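-- pv_equiv track=rewrite | github.com/huuhieu56/PC-Parts-ECommerce | scripts/generate_products_sql.py | detect_os_version
-- ===== SOURCE A (Python) =====
-- from typing import Any, Callable, Deque, Dict, Iterable, List, Optional, Tuple
--
-- def detect_os_version(name: Optional[str]) -> Optional[str]:
--     if not name:
--         return None
--     text = name.replace('Microsoft', '').strip()
--     for token in (' - ', ' OEM', ' Retail', '('):
--         if token in text:
--             text = text.split(token)[0].strip()
--     return text or None
-- ===== SOURCE B (Python) =====
-- from typing import Optional
--
--
-- def detect_os_version(name: Optional[str]) -> Optional[str]:
--     if not name: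
--         return None
--     text = name.replace('Microsoft', '').strip()
--     idxs = [i for i in (text.find(t) for t in (' - ', ' OEM', ' Retail', '(')) if i != -1]
--     if idxs:
--         text = text[:min(idxs)].strip()
--     return text or None
-- ===== Notes on version B (the rewrite author's own statement) =====
-- stated objective: alternative
-- what changed: Replaces A's sequential per-token split-and-strip loop (each found token re-splits and re-strips the shrinking text) by a single cut: compute each token's first index with find, take the minimum present index, and slice-and-strip once.
import Mathlib
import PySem

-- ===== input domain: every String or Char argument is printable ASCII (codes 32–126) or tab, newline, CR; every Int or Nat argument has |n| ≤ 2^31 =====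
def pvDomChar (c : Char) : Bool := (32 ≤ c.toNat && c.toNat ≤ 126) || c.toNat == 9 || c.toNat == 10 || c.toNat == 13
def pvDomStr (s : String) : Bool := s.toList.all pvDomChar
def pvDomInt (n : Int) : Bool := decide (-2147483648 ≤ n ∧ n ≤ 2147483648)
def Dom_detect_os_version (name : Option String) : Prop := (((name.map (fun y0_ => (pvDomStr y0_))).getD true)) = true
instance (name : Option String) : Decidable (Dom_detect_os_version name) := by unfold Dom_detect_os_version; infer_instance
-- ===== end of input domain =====

-- B replaces A's sequential per-token split-and-strip loop by one cut at the minimal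
-- first index of any present token (alternative decomposition, same cost).

-- ===== PORT A =====
def detect_os_version (name : Option String) : Option String :=
  match name with
  | none => none
  | some n =>
    if n = "" then none
    else
      let text := PySem.Str.strip (PySem.Str.replace n "Microsoft" "")
      let text := [" - ", " OEM", " Retail", "("].foldl
        (fun t tok =>
          if PySem.Str.isIn tok t then
            PySem.Str.strip (((PySem.Str.split? t tok).getD []).getD 0 "")
          else t) text
      if text = "" then none else some text

-- ===== PORT B =====
def detect_os_version_alt (name : Option String) : Option String :=
  match name with
  | none => none
  | some n =>
    if n = "" then none
    else
      let text := PySem.Str.strip (PySem.Str.replace n "Microsoft" "")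
      let idxs := ([" - ", " OEM", " Retail", "("].map
        (fun t => PySem.Str.find text t)).filter (fun i => i != -1)
      let text := match PySem.List.min? idxs (fun x => x) with
        | none => text
        | some m => PySem.Str.strip (PySem.Str.slice text none (some m))
      if text = "" then none else some text

-- ===== PRECONDITION & SPEC =====
def Spec_detect_os_version (name : Option String) (out : Option String) : Prop := out = detect_os_version_alt name
instance (name : Option String) (out : Option String) : Decidable (Spec_detect_os_version name out) := by unfold Spec_detect_os_version; infer_instance

-- ===== CLAIM (what is proved, stated in full; the proofs are below) =====
def Claim_equal_detect_os_version : Prop := ∀ (name : Option String), Dom_detect_os_version name → Spec_detect_os_version name (detect_os_version name)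

-- ===== LEMMAS AND PROOFS =====

-- A's per-token step, at the character-list level.
def pvCutA (t tok : List Char) : List Char :=
  if PySem.Chars.isIn tok t then PySem.Chars.strip ((PySem.Chars.splitOn t tok).headD []) else t

-- running minimum of cut positions: take index i if it is a real find result below c
def pvFmin (c : Nat) (i : Int) : Nat := if 0 ≤ i ∧ i < (c : Int) then i.toNat else c

-- characters of l before the first occurrence of sub (structural companion of splitOn's first part)
def pvPreTok (sub : List Char) : List Char → List Char
  | [] => []
  | c :: r => if sub.isPrefixOf (c :: r) then [] else c :: pvPreTok sub r

-- ---- basic strip facts ----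
lemma pv_lstrip_take (y : List Char) (h : PySem.Chars.lstrip y = y) (j : Nat) :
    PySem.Chars.lstrip (y.take j) = y.take j := by
  unfold PySem.Chars.lstrip at h ⊢
  rw [List.dropWhile_eq_self_iff] at h ⊢
  intro hl
  have hy : 0 < y.length := by simp at hl; omega
  have : (y.take j)[0]'hl = y[0]'hy := List.getElem_take
  rw [this]
  exact h hy


lemma pv_rstrip_prefix (y : List Char) : PySem.Chars.rstrip y <+: y := by
  unfold PySem.Chars.rstrip
  have := List.dropWhile_suffix (l := y.reverse) PySem.Chars.isspace
  have h2 := List.reverse_prefix.mpr this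
  simpa using h2


lemma pv_rstrip_zone (y : List Char) (k : Nat) (h1 : (PySem.Chars.rstrip y).length ≤ k)
    (h2 : k < y.length) : PySem.Chars.isspace y[k] = true := by
  have hsplit : List.takeWhile PySem.Chars.isspace y.reverse
      ++ List.dropWhile PySem.Chars.isspace y.reverse = y.reverse := List.takeWhile_append_dropWhile
  have hy : y = PySem.Chars.rstrip y ++ (List.takeWhile PySem.Chars.isspace y.reverse).reverse := by
    unfold PySem.Chars.rstrip
    have h3 := congrArg List.reverse hsplit
    simp only [List.reverse_append, List.reverse_reverse] at h3
    exact h3.symm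
  have hk2 : k < (PySem.Chars.rstrip y ++ (List.takeWhile PySem.Chars.isspace y.reverse).reverse).length := by
    rw [← hy]; exact h2
  have hget : y[k] = ((List.takeWhile PySem.Chars.isspace y.reverse).reverse)[k - (PySem.Chars.rstrip y).length]'(by
      have := hk2; simp at this ⊢; omega) := by
    rw [List.getElem_of_eq hy h2]
    exact List.getElem_append_right h1
  have hmem : y[k] ∈ (List.takeWhile PySem.Chars.isspace y.reverse).reverse := by
    rw [hget]; exact List.getElem_mem _
  rw [List.mem_reverse] at hmem
  exact List.mem_takeWhile_imp hmem


lemma pv_rstrip_rstrip (y : List Char) :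
    PySem.Chars.rstrip (PySem.Chars.rstrip y) = PySem.Chars.rstrip y := by
  unfold PySem.Chars.rstrip
  rw [List.reverse_reverse, List.dropWhile_idempotent]


lemma pv_lstrip_strip (y : List Char) :
    PySem.Chars.lstrip (PySem.Chars.strip y) = PySem.Chars.strip y := by
  have h1 : PySem.Chars.lstrip (PySem.Chars.lstrip y) = PySem.Chars.lstrip y := by
    unfold PySem.Chars.lstrip; exact List.dropWhile_idempotent _ _
  have h2 := pv_rstrip_prefix (PySem.Chars.lstrip y)
  rw [List.prefix_iff_eq_take] at h2
  unfold PySem.Chars.strip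
  rw [h2]
  exact pv_lstrip_take _ h1 _


lemma pv_rstrip_strip (y : List Char) :
    PySem.Chars.rstrip (PySem.Chars.strip y) = PySem.Chars.strip y := by
  unfold PySem.Chars.strip
  exact pv_rstrip_rstrip _


lemma pv_strip_eq_rstrip (y : List Char) (h : PySem.Chars.lstrip y = y) :
    PySem.Chars.strip y = PySem.Chars.rstrip y := by
  unfold PySem.Chars.strip
  rw [h]


-- ---- splitOn head ----
lemma pv_preTok_prefix (sub l : List Char) : pvPreTok sub l <+: l := by
  induction l with
  | nil => simp [pvPreTok]
  | cons c r ih =>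
    rw [pvPreTok]
    split
    · exact List.nil_prefix
    · exact List.cons_prefix_cons.mpr ⟨rfl, ih⟩


lemma pv_preTok_no_occ (sub l : List Char) (j : Nat) (hj : j < (pvPreTok sub l).length) :
    ¬ sub <+: l.drop j := by
  induction l generalizing j with
  | nil => simp [pvPreTok] at hj
  | cons c r ih =>
    rw [pvPreTok] at hj
    split at hj
    · simp at hj
    · rename_i hp
      cases j with
      | zero =>
        intro hpre
        exact hp (List.isPrefixOf_iff_prefix.mpr (by simpa using hpre))
      | succ j =>
        simpa using ih j (by simpa using hj)


lemma pv_preTok_occ (sub l : List Char) (hlt : (pvPreTok sub l).length < l.length) :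
    sub <+: l.drop (pvPreTok sub l).length := by
  induction l with
  | nil => simp [pvPreTok] at hlt
  | cons c r ih =>
    by_cases hp : sub.isPrefixOf (c :: r)
    · simp only [pvPreTok, hp, if_true, List.length_nil, List.drop_zero]
      exact List.isPrefixOf_iff_prefix.mp hp
    · simp only [pvPreTok, if_neg hp, List.length_cons] at hlt ⊢
      rw [List.drop_succ_cons]
      exact ih (by omega)


lemma pv_go_shape (sub : List Char) (hsub : sub ≠ []) :
    ∀ (fuel : Nat) (l cur : List Char) (acc : List (List Char)), l.length < fuel →
      ∃ tail, PySem.Chars.splitOn.go sub fuel l cur acc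
        = acc.reverse ++ (cur.reverse ++ pvPreTok sub l) :: tail := by
  intro fuel
  induction fuel with
  | zero => intro l cur acc h; omega
  | succ f ih =>
    intro l cur acc h
    cases l with
    | nil =>
      refine ⟨[], ?_⟩
      rw [PySem.Chars.splitOn.go]
      · simp [pvPreTok]
      · omega
    | cons c r =>
      rw [PySem.Chars.splitOn.go]
      by_cases hp : sub.isPrefixOf (c :: r)
      · rw [if_pos hp]
        have hlen : (List.drop sub.length (c :: r)).length < f := by
          have h1 : 1 ≤ sub.length := by
            cases sub with
            | nil => exact absurd rfl hsub
            | cons a b => simp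
          simp only [List.length_drop, List.length_cons] at *
          omega
        obtain ⟨tail, ht⟩ := ih (List.drop sub.length (c :: r)) [] (cur.reverse :: acc) hlen
        refine ⟨pvPreTok sub (List.drop sub.length (c :: r)) :: tail, ?_⟩
        rw [ht]
        simp [pvPreTok, hp]
      · rw [if_neg hp]
        obtain ⟨tail, ht⟩ := ih r (c :: cur) acc (by simp at h ⊢; omega)
        refine ⟨tail, ?_⟩
        rw [ht]
        simp [pvPreTok, hp]

lemma pv_splitOn_head (sub l : List Char) (hsub : sub ≠ []) :
    (PySem.Chars.splitOn l sub).headD [] = pvPreTok sub l := by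
  obtain ⟨tail, ht⟩ := pv_go_shape sub hsub (l.length + 1) l [] [] (by omega)
  unfold PySem.Chars.splitOn
  rw [ht]
  simp


lemma pv_preTok_eq (sub l : List Char) (hsub : sub ≠ []) :
    pvPreTok sub l =
      if PySem.Chars.find l sub = -1 then l else l.take (PySem.Chars.find l sub).toNat := by
  by_cases hf : PySem.Chars.find l sub = -1
  · rw [if_pos hf]
    have hno : ∀ j, ¬ sub <+: l.drop j := by
      intro j hj
      have hin : PySem.Chars.isIn sub l = true :=
        (PySem.Chars.exists_prefix_drop_iff_isIn sub l).mp ⟨j, hj⟩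
      unfold PySem.Chars.isIn at hin
      simp [hf] at hin
    have hp := pv_preTok_prefix sub l
    have hle := hp.length_le
    rcases lt_or_eq_of_le hle with hlt | heq
    · exact absurd (pv_preTok_occ sub l hlt) (hno _)
    · exact (List.prefix_iff_eq_take.mp hp).trans (by rw [heq, List.take_length])
  · rw [if_neg hf]
    have h0 : 0 ≤ PySem.Chars.find l sub := by
      have := PySem.Chars.neg_one_le_find l sub
      omega
    obtain ⟨hocc, hmin⟩ := PySem.Chars.find_spec h0
    have hj1len : (PySem.Chars.find l sub).toNat < l.length := by
      obtain ⟨t, ht⟩ := hocc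
      have := congrArg List.length ht
      simp at this
      cases sub with
      | nil => exact absurd rfl hsub
      | cons a b => simp at this; omega
    have hlen : (pvPreTok sub l).length = (PySem.Chars.find l sub).toNat := by
      rcases Nat.lt_trichotomy (pvPreTok sub l).length (PySem.Chars.find l sub).toNat with h | h | h
      · exact absurd (pv_preTok_occ sub l (by omega)) (hmin _ h)
      · exact h
      · exact absurd hocc (pv_preTok_no_occ sub l _ h)
    rw [List.prefix_iff_eq_take.mp (pv_preTok_prefix sub l), hlen]


-- occurrence head char
lemma pv_occ_head (s tok : List Char) (j : Nat) (htok : tok ≠ []) (h : tok <+: s.drop j) :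
    ∃ hj : j < s.length, s[j] = tok.headI := by
  cases tok with
  | nil => exact absurd rfl htok
  | cons t0 tt =>
    obtain ⟨t, ht⟩ := h
    have hh : (s.drop j).head? = some t0 := by rw [← ht]; rfl
    rw [List.head?_drop] at hh
    rw [List.getElem?_eq_some_iff] at hh
    obtain ⟨hj, hv⟩ := hh
    exact ⟨hj, by simp [hv, List.headI]⟩


-- find and isIn bookkeeping
lemma pv_isIn_eq_false (tok t : List Char) (h : ∀ j, ¬ tok <+: t.drop j) :
    PySem.Chars.isIn tok t = false := by
  cases hin : PySem.Chars.isIn tok t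
  · rfl
  · obtain ⟨j, hj⟩ := (PySem.Chars.exists_prefix_drop_iff_isIn tok t).mpr hin
    exact absurd hj (h j)


lemma pv_find_eq_of (t tok : List Char) (j : Nat) (hocc : tok <+: t.drop j)
    (hmin : ∀ i, i < j → ¬ tok <+: t.drop i) : PySem.Chars.find t tok = (j : Int) := by
  have hin : PySem.Chars.isIn tok t = true :=
    (PySem.Chars.exists_prefix_drop_iff_isIn tok t).mp ⟨j, hocc⟩
  have hne : PySem.Chars.find t tok ≠ -1 := by
    unfold PySem.Chars.isIn at hin
    simpa using hin
  have h0 : 0 ≤ PySem.Chars.find t tok := by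
    have := PySem.Chars.neg_one_le_find t tok
    omega
  obtain ⟨hocc', hmin'⟩ := PySem.Chars.find_spec h0
  have : (PySem.Chars.find t tok).toNat = j := by
    rcases Nat.lt_trichotomy (PySem.Chars.find t tok).toNat j with h | h | h
    · exact absurd hocc' (hmin _ h)
    · exact h
    · exact absurd hocc (hmin' _ h)
  omega


-- occurrences transfer elementwise
lemma pv_occ_getElem (s tok : List Char) (j k : Nat) (hocc : tok <+: s.drop j)
    (hk : k < tok.length) : ∃ h : j + k < s.length, s[j + k] = tok[k] := by
  obtain ⟨t, ht⟩ := hocc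
  have hlen : tok.length + t.length = s.length - j := by
    have := congrArg List.length ht
    simpa using this
  have hjk : j + k < s.length := by
    have := List.length_drop (l := s) (i := j)
    by_cases hjs : j ≤ s.length
    · omega
    · exfalso
      have hnil : s.drop j = [] := List.drop_eq_nil_of_le (by omega)
      rw [hnil] at ht
      have := congrArg List.length ht
      simp at this
      omega
  refine ⟨hjk, ?_⟩
  have h1 : s[j + k] = (s.drop j)[k]'(by simp; omega) := by
    rw [List.getElem_drop]
  have h2 : (s.drop j)[k]'(by simp; omega) = (tok ++ t)[k]'(by simp; omega) := by
    simp only [ht]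
  rw [h1, h2, List.getElem_append_left hk]

-- ---- A's single step ----
lemma pv_stepA (s tok : List Char) (c : Nat)
    (hsl : PySem.Chars.lstrip s = s) (hsr : PySem.Chars.rstrip s = s)
    (htok : tok ≠ [])
    (hc : c ≤ s.length)
    (hcb : c = s.length ∨
      ((∃ hcl : c < s.length, s[c] = ' ' ∨ s[c] = '(')
        ∧ (∀ (k : Nat) (hk : k < tok.length), 1 ≤ k →
             PySem.Chars.isspace tok[k] = false ∧ tok[k] ≠ '(')
        ∧ (PySem.Chars.isspace tok.headI = false ∨ 2 ≤ tok.length))) :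
    pvCutA (PySem.Chars.rstrip (s.take c)) tok
        = PySem.Chars.rstrip (s.take (pvFmin c (PySem.Chars.find s tok)))
      ∧ (pvFmin c (PySem.Chars.find s tok) = c
         ∨ tok <+: s.drop (pvFmin c (PySem.Chars.find s tok))) := by
  have htoklen : 1 ≤ tok.length := List.length_pos_iff.mpr htok
  rcases hcb with hceq | ⟨⟨hclt, hbd⟩, hbody, hhead⟩
  · -- c = s.length : the current text is s itself
    subst hceq
    have hcur : PySem.Chars.rstrip (s.take s.length) = s := by
      rw [List.take_length, hsr]
    by_cases hf : PySem.Chars.find s tok = -1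
    · have hno : ∀ j, ¬ tok <+: s.drop j := by
        intro j hj
        have hin := (PySem.Chars.exists_prefix_drop_iff_isIn tok s).mp ⟨j, hj⟩
        unfold PySem.Chars.isIn at hin
        simp [hf] at hin
      have hfm : pvFmin s.length (PySem.Chars.find s tok) = s.length := by
        unfold pvFmin
        rw [if_neg (by omega)]
      rw [hfm]
      refine ⟨?_, Or.inl rfl⟩
      unfold pvCutA
      rw [hcur, pv_isIn_eq_false tok s hno]
      simp
    · have h0 : 0 ≤ PySem.Chars.find s tok := by
        have := PySem.Chars.neg_one_le_find s tok
        omega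
      obtain ⟨hocc, hmin⟩ := PySem.Chars.find_spec h0
      have hj1s : (PySem.Chars.find s tok).toNat + tok.length ≤ s.length := by
        obtain ⟨h1, _⟩ := pv_occ_getElem s tok (PySem.Chars.find s tok).toNat (tok.length - 1) hocc (by omega)
        omega
      have hfm : pvFmin s.length (PySem.Chars.find s tok)
          = (PySem.Chars.find s tok).toNat := by
        unfold pvFmin
        rw [if_pos (by omega)]
      rw [hfm]
      constructor
      · unfold pvCutA
        rw [hcur]
        have hin := (PySem.Chars.exists_prefix_drop_iff_isIn tok s).mp ⟨_, hocc⟩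
        rw [hin, if_pos rfl, pv_splitOn_head tok s htok, pv_preTok_eq tok s htok, if_neg hf]
        exact pv_strip_eq_rstrip _ (pv_lstrip_take s hsl _)
      · exact Or.inr hocc
  · -- c < s.length, the boundary char starts a token, tok has a rigid body
    have hplen : (s.take c).length = c := by simp; omega
    have hdle : (PySem.Chars.rstrip (s.take c)).length ≤ c := by
      have := (pv_rstrip_prefix (s.take c)).length_le
      omega
    set d := (PySem.Chars.rstrip (s.take c)).length with hd
    have hcurtake : PySem.Chars.rstrip (s.take c) = s.take d := by
      have h1 := List.prefix_iff_eq_take.mp (pv_rstrip_prefix (s.take c))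
      rw [h1, List.take_take, Nat.min_eq_left hdle]
    have hzone : ∀ k, ∀ hk : k < s.length, d ≤ k → k < c → PySem.Chars.isspace s[k] = true := by
      intro k hk h1 h2
      have hz := pv_rstrip_zone (s.take c) k (by omega) (by omega)
      rwa [List.getElem_take] at hz
    have htrans : ∀ j, tok <+: (PySem.Chars.rstrip (s.take c)).drop j
        ↔ (tok <+: s.drop j ∧ j + tok.length ≤ d) := by
      intro j
      rw [hcurtake, List.drop_take]
      constructor
      · intro hj
        have := List.prefix_take_iff.mp hj
        exact ⟨this.1, by omega⟩
      · intro ⟨h1, h2⟩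
        exact List.prefix_take_iff.mpr ⟨h1, by omega⟩
    by_cases hf : PySem.Chars.find s tok = -1
    · have hno : ∀ j, ¬ tok <+: s.drop j := by
        intro j hj
        have hin := (PySem.Chars.exists_prefix_drop_iff_isIn tok s).mp ⟨j, hj⟩
        unfold PySem.Chars.isIn at hin
        simp [hf] at hin
      have hfm : pvFmin c (PySem.Chars.find s tok) = c := by
        unfold pvFmin
        rw [if_neg (by omega)]
      rw [hfm]
      refine ⟨?_, Or.inl rfl⟩
      unfold pvCutA
      rw [pv_isIn_eq_false tok _ (fun j hj => hno j ((htrans j).mp hj).1)]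
      simp
    · have h0 : 0 ≤ PySem.Chars.find s tok := by
        have := PySem.Chars.neg_one_le_find s tok
        omega
      obtain ⟨hocc, hmin⟩ := PySem.Chars.find_spec h0
      set j1 := (PySem.Chars.find s tok).toNat with hj1
      have hj1s : j1 + tok.length ≤ s.length := by
        obtain ⟨h1, _⟩ := pv_occ_getElem s tok j1 (tok.length - 1) hocc (by omega)
        omega
      by_cases hic : PySem.Chars.find s tok < (c : Int)
      · -- a real cut at j1 = the first occurrence, below c
        have hj1c : j1 < c := by omega
        -- no occurrence of tok straddles c
        have hstep1 : j1 + tok.length ≤ c := by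
          by_contra hcon
          obtain ⟨hklt, hkeq0⟩ := pv_occ_getElem s tok j1 (c - j1) hocc (by omega)
          have hkeq : s[c]'hclt = tok[c - j1]'(by omega) :=
            (getElem_congr_idx (by omega)).trans hkeq0
          obtain ⟨hb1, hb2⟩ := hbody (c - j1) (by omega) (by omega)
          rcases hbd with hsp | hpar
          · rw [hsp] at hkeq
            rw [← hkeq] at hb1
            simp [PySem.Chars.isspace] at hb1
          · rw [hpar] at hkeq
            exact hb2 hkeq.symm
        -- the cut lands inside the stripped current text
        have hstep2 : j1 + tok.length ≤ d := by
          by_contra hcon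
          by_cases hjd : d ≤ j1
          · obtain ⟨hl0, he00⟩ := pv_occ_getElem s tok j1 0 hocc (by omega)
            have he0 : s[j1]'(by omega) = tok[0]'(by omega) :=
              (getElem_congr_idx (by omega)).trans he00
            have hz0 := hzone j1 (by omega) hjd hj1c
            rw [he0] at hz0
            rcases hhead with hh1 | hh2
            · cases tok with
              | nil => exact absurd rfl htok
              | cons a b =>
                simp only [List.headI] at hh1
                simp only [List.getElem_cons_zero] at hz0
                rw [hh1] at hz0
                simp at hz0
            · obtain ⟨hl1, he1⟩ := pv_occ_getElem s tok j1 1 hocc (by omega)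
              have hz1 := hzone (j1 + 1) hl1 (by omega) (by omega)
              obtain ⟨hb1, _⟩ := hbody 1 (by omega) (by omega)
              have hcontr : (true : Bool) = false :=
                hz1.symm.trans ((congrArg PySem.Chars.isspace he1).trans hb1)
              simp at hcontr
          · obtain ⟨hl1, he10⟩ := pv_occ_getElem s tok j1 (d - j1) hocc (by omega)
            have he1 : s[d]'(by omega) = tok[d - j1]'(by omega) :=
              (getElem_congr_idx (by omega)).trans he10
            have hz1 := hzone d (by omega) (by omega) (by omega)
            obtain ⟨hb1, _⟩ := hbody (d - j1) (by omega) (by omega)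
            have hcontr : (true : Bool) = false :=
              hz1.symm.trans ((congrArg PySem.Chars.isspace he1).trans hb1)
            simp at hcontr
        have hoccur : tok <+: (PySem.Chars.rstrip (s.take c)).drop j1 :=
          (htrans j1).mpr ⟨hocc, hstep2⟩
        have hminc : ∀ jj, jj < j1 → ¬ tok <+: (PySem.Chars.rstrip (s.take c)).drop jj :=
          fun jj hjj hcj => hmin jj hjj ((htrans jj).mp hcj).1
        have hfind : PySem.Chars.find (PySem.Chars.rstrip (s.take c)) tok = (j1 : Int) :=
          pv_find_eq_of _ tok j1 hoccur hminc
        have hfm : pvFmin c (PySem.Chars.find s tok) = j1 := by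
          unfold pvFmin
          rw [if_pos ⟨h0, hic⟩]
        rw [hfm]
        constructor
        · unfold pvCutA
          have hin := (PySem.Chars.exists_prefix_drop_iff_isIn tok _).mp ⟨j1, hoccur⟩
          rw [hin, if_pos rfl, pv_splitOn_head tok _ htok, pv_preTok_eq tok _ htok,
            if_neg (by rw [hfind]; omega), hfind]
          have htake : (PySem.Chars.rstrip (s.take c)).take ((j1 : Int)).toNat = s.take j1 := by
            rw [hcurtake, List.take_take]
            congr 1
            omega
          rw [htake]
          exact pv_strip_eq_rstrip _ (pv_lstrip_take s hsl _)
        · exact Or.inr hocc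
      · -- first occurrence at or past c : nothing happens
        have hfm : pvFmin c (PySem.Chars.find s tok) = c := by
          unfold pvFmin
          rw [if_neg (by omega)]
        rw [hfm]
        refine ⟨?_, Or.inl rfl⟩
        unfold pvCutA
        have hno : ∀ j, ¬ tok <+: (PySem.Chars.rstrip (s.take c)).drop j := by
          intro j hj
          obtain ⟨hjs, hjd⟩ := (htrans j).mp hj
          exact hmin j (by omega) hjs
        rw [pv_isIn_eq_false tok _ hno]
        simp

-- ---- fold of pvFmin vs min? ----
lemma pv_fmin_le (c : Nat) (i : Int) : pvFmin c i ≤ c := by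
  unfold pvFmin
  split <;> omega

lemma pv_fold_fmin_char (is : List Int) (c : Nat) :
    is.foldl pvFmin c ≤ c
      ∧ (∀ i ∈ is, 0 ≤ i → (↑(is.foldl pvFmin c) : Int) ≤ i)
      ∧ (is.foldl pvFmin c = c ∨ ∃ i ∈ is, 0 ≤ i ∧ (↑(is.foldl pvFmin c) : Int) = i) := by
  induction is generalizing c with
  | nil => exact ⟨le_refl _, by simp, Or.inl rfl⟩
  | cons x t ih =>
    obtain ⟨h1, h2, h3⟩ := ih (pvFmin c x)
    have hle : pvFmin c x ≤ c := pv_fmin_le c x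
    have hxle : 0 ≤ x → ((pvFmin c x : Nat) : Int) ≤ x := by
      intro hx
      unfold pvFmin
      split <;> omega
    have hcase : pvFmin c x = c ∨ (0 ≤ x ∧ ((pvFmin c x : Nat) : Int) = x) := by
      unfold pvFmin
      split <;> [right; left] <;> omega
    rw [List.foldl_cons]
    refine ⟨le_trans h1 hle, ?_, ?_⟩
    · intro i hi h0i
      rcases List.mem_cons.mp hi with rfl | hit
      · exact le_trans (by exact_mod_cast h1) (hxle h0i)
      · exact h2 i hit h0i
    · rcases h3 with hF | ⟨i, hit, h0i, hFi⟩
      · rcases hcase with hc | ⟨hx0, hxeq⟩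
        · exact Or.inl (hF.trans hc)
        · exact Or.inr ⟨x, List.mem_cons_self, hx0, by rw [hF]; exact hxeq⟩
      · exact Or.inr ⟨i, List.mem_cons_of_mem _ hit, h0i, hFi⟩

lemma pv_fold_fmin (is : List Int) (c : Nat) (his : ∀ i ∈ is, -1 ≤ i) :
    is.foldl pvFmin c =
      (match PySem.List.min? (is.filter (fun i => i != -1)) (fun x => x) with
        | none => c
        | some m => min c m.toNat) := by
  obtain ⟨h1, h2, h3⟩ := pv_fold_fmin_char is c
  cases hm : PySem.List.min? (is.filter (fun i => i != -1)) (fun x => x) with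
  | none =>
    have hnil := (PySem.List.min?_eq_none_iff _ _).mp hm
    have hall : ∀ i ∈ is, i = -1 := by
      intro i hi
      by_contra hne
      have : i ∈ is.filter (fun i => i != -1) :=
        List.mem_filter.mpr ⟨hi, by simpa using hne⟩
      rw [hnil] at this
      exact absurd this (List.not_mem_nil)
    show is.foldl pvFmin c = c
    rcases h3 with hF | ⟨i, hit, h0i, _⟩
    · exact hF
    · have := hall i hit
      omega
  | some m =>
    have hmem := PySem.List.min?_mem hm
    obtain ⟨hmis, hmne⟩ := List.mem_filter.mp hmem
    have hm0 : 0 ≤ m := by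
      have := his m hmis
      simp at hmne
      omega
    have hmin := PySem.List.min?_isMin hm
    have hFm : (↑(is.foldl pvFmin c) : Int) ≤ m := h2 m hmis hm0
    show is.foldl pvFmin c = min c m.toNat
    rcases h3 with hF | ⟨i, hit, h0i, hFi⟩
    · rw [hF] at hFm
      rw [hF]
      omega
    · have hmi : m ≤ i := hmin i (List.mem_filter.mpr ⟨hit, by simp; omega⟩)
      omega

-- ---- the main character-level theorem ----
lemma pv_main (L : List Char)
    (hsl : PySem.Chars.lstrip L = L) (hsr : PySem.Chars.rstrip L = L) :
    [[' ', '-', ' '], [' ', 'O', 'E', 'M'], [' ', 'R', 'e', 't', 'a', 'i', 'l'], ['(']].foldl pvCutA L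
      = (match PySem.List.min?
            (([[' ', '-', ' '], [' ', 'O', 'E', 'M'], [' ', 'R', 'e', 't', 'a', 'i', 'l'], ['(']].map
               (fun t => PySem.Chars.find L t)).filter (fun i => i != -1)) (fun x => x) with
          | none => L
          | some m => PySem.Chars.strip (PySem.List.slice L none (some m))) := by
  -- a fresh cut position starts an occurrence of a token, whose head is ' ' or '('
  have occb : ∀ (tok : List Char) (c' : Nat), tok ≠ [] →
      tok.headI = ' ' ∨ tok.headI = '(' → tok <+: L.drop c' →
      ∃ hcl : c' < L.length, L[c'] = ' ' ∨ L[c'] = '(' := by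
    intro tok c' htok hh hocc
    obtain ⟨hlt, he⟩ := pv_occ_head L tok c' htok hocc
    refine ⟨hlt, ?_⟩
    rw [he]
    rcases hh with h' | h' <;> [left; right] <;> rw [h']
  -- abbreviations for the four cut positions
  set i1 := PySem.Chars.find L [' ', '-', ' '] with hi1
  set i2 := PySem.Chars.find L [' ', 'O', 'E', 'M'] with hi2
  set i3 := PySem.Chars.find L [' ', 'R', 'e', 't', 'a', 'i', 'l'] with hi3
  set i4 := PySem.Chars.find L ['('] with hi4
  set c1 := pvFmin L.length i1 with hc1
  set c2 := pvFmin c1 i2 with hc2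
  set c3 := pvFmin c2 i3 with hc3
  set c4 := pvFmin c3 i4 with hc4
  -- step 1: token " - "
  obtain ⟨hs1, hb1⟩ := pv_stepA L [' ', '-', ' '] L.length hsl hsr (by decide)
    (le_refl _) (Or.inl rfl)
  rw [← hi1] at hs1 hb1
  rw [← hc1] at hs1 hb1
  have hle1 : c1 ≤ L.length := pv_fmin_le _ _
  have hcb1 : c1 = L.length ∨ ∃ hcl : c1 < L.length, L[c1] = ' ' ∨ L[c1] = '(' := by
    rcases hb1 with h | h
    · rw [h]
      exact Or.inl rfl
    · exact Or.inr (occb _ _ (by decide) (Or.inl rfl) h)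
  -- step 2: token " OEM"
  obtain ⟨hs2, hb2⟩ := pv_stepA L [' ', 'O', 'E', 'M'] c1 hsl hsr (by decide) hle1
    (hcb1.elim Or.inl (fun h => Or.inr ⟨h, by decide, Or.inr (by decide)⟩))
  rw [← hi2] at hs2 hb2
  rw [← hc2] at hs2 hb2
  have hle2 : c2 ≤ c1 := pv_fmin_le _ _
  have hcb2 : c2 = L.length ∨ ∃ hcl : c2 < L.length, L[c2] = ' ' ∨ L[c2] = '(' := by
    rcases hb2 with h | h
    · rw [h]
      exact hcb1
    · exact Or.inr (occb _ _ (by decide) (Or.inl rfl) h)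
  -- step 3: token " Retail"
  obtain ⟨hs3, hb3⟩ := pv_stepA L [' ', 'R', 'e', 't', 'a', 'i', 'l'] c2 hsl hsr (by decide)
    (le_trans hle2 hle1)
    (hcb2.elim Or.inl (fun h => Or.inr ⟨h, by decide, Or.inr (by decide)⟩))
  rw [← hi3] at hs3 hb3
  rw [← hc3] at hs3 hb3
  have hle3 : c3 ≤ c2 := pv_fmin_le _ _
  have hcb3 : c3 = L.length ∨ ∃ hcl : c3 < L.length, L[c3] = ' ' ∨ L[c3] = '(' := by
    rcases hb3 with h | h
    · rw [h]
      exact hcb2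
    · exact Or.inr (occb _ _ (by decide) (Or.inl rfl) h)
  -- step 4: token "("
  obtain ⟨hs4, _⟩ := pv_stepA L ['('] c3 hsl hsr (by decide)
    (le_trans hle3 (le_trans hle2 hle1))
    (hcb3.elim Or.inl (fun h => Or.inr ⟨h, by decide, Or.inl (by decide)⟩))
  rw [← hi4] at hs4
  rw [← hc4] at hs4
  -- assemble the A side
  have hL : PySem.Chars.rstrip (L.take L.length) = L := by
    rw [List.take_length, hsr]
  have k1 : pvCutA L [' ', '-', ' '] = PySem.Chars.rstrip (L.take c1) := by
    rw [← hs1, List.take_length, hsr]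
  have hA : [[' ', '-', ' '], [' ', 'O', 'E', 'M'], [' ', 'R', 'e', 't', 'a', 'i', 'l'], ['(']].foldl pvCutA L
      = PySem.Chars.rstrip (L.take c4) := by
    have e : [[' ', '-', ' '], [' ', 'O', 'E', 'M'], [' ', 'R', 'e', 't', 'a', 'i', 'l'], ['(']].foldl pvCutA L
        = pvCutA (pvCutA (pvCutA (pvCutA L [' ', '-', ' ']) [' ', 'O', 'E', 'M'])
            [' ', 'R', 'e', 't', 'a', 'i', 'l']) ['('] := by
      simp [List.foldl]
    rw [e, k1, hs2, hs3, hs4]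
  rw [hA]
  -- fold of pvFmin over the four finds
  have hfold : [i1, i2, i3, i4].foldl pvFmin L.length = c4 := by
    simp [List.foldl, hc1, hc2, hc3, hc4]
  have hneg1 : ∀ i ∈ [i1, i2, i3, i4], -1 ≤ i := by
    intro i hi
    rcases List.mem_cons.mp hi with rfl | hi
    · exact PySem.Chars.neg_one_le_find L _
    rcases List.mem_cons.mp hi with rfl | hi
    · exact PySem.Chars.neg_one_le_find L _
    rcases List.mem_cons.mp hi with rfl | hi
    · exact PySem.Chars.neg_one_le_find L _
    rcases List.mem_cons.mp hi with rfl | hi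
    · exact PySem.Chars.neg_one_le_find L _
    · exact absurd hi (List.not_mem_nil)
  have hlen : ∀ i ∈ [i1, i2, i3, i4], i ≤ (L.length : Int) := by
    intro i hi
    rcases List.mem_cons.mp hi with rfl | hi
    · exact PySem.Chars.find_le_length L _
    rcases List.mem_cons.mp hi with rfl | hi
    · exact PySem.Chars.find_le_length L _
    rcases List.mem_cons.mp hi with rfl | hi
    · exact PySem.Chars.find_le_length L _
    rcases List.mem_cons.mp hi with rfl | hi
    · exact PySem.Chars.find_le_length L _
    · exact absurd hi (List.not_mem_nil)
  have hff := pv_fold_fmin [i1, i2, i3, i4] L.length hneg1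
  rw [hfold] at hff
  have hmapeq : ([[' ', '-', ' '], [' ', 'O', 'E', 'M'], [' ', 'R', 'e', 't', 'a', 'i', 'l'], ['(']].map
      (fun t => PySem.Chars.find L t)) = [i1, i2, i3, i4] := by
    simp [List.map, hi1, hi2, hi3, hi4]
  rw [hmapeq]
  cases hm : PySem.List.min? ([i1, i2, i3, i4].filter (fun i => i != -1)) (fun x => x) with
  | none =>
    rw [hm] at hff
    have hff2 : c4 = L.length := hff
    show PySem.Chars.rstrip (L.take c4) = L
    rw [hff2, List.take_length, hsr]
  | some m =>
    rw [hm] at hff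
    have hff2 : c4 = min L.length m.toNat := hff
    have hmem := PySem.List.min?_mem hm
    obtain ⟨hmis, hmne⟩ := List.mem_filter.mp hmem
    have hm0 : 0 ≤ m := by
      have := hneg1 m hmis
      simp at hmne
      omega
    have hmlen : m ≤ (L.length : Int) := hlen m hmis
    have hminc : min L.length m.toNat = m.toNat := by omega
    show PySem.Chars.rstrip (L.take c4)
        = PySem.Chars.strip (PySem.List.slice L none (some m))
    rw [hff2, hminc, PySem.List.slice_to L hm0,
      pv_strip_eq_rstrip _ (pv_lstrip_take L hsl _)]

-- ---- glue: one Str-level A step is pvCutA on toList ----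
lemma pv_getD_map (P : List (List Char)) :
    (List.getD (P.map String.ofList) 0 "").toList = P.headD [] := by
  cases P <;> simp [List.getD]

lemma pv_strStep (t tok : String) (htok : tok ≠ "") :
    (if PySem.Str.isIn tok t then
        PySem.Str.strip (((PySem.Str.split? t tok).getD []).getD 0 "")
      else t).toList = pvCutA t.toList tok.toList := by
  have htok' : tok.toList ≠ [] := fun h => htok (String.toList_eq_nil_iff.mp h)
  unfold pvCutA
  rw [← PySem.Str.isIn_eq]
  by_cases hin : PySem.Str.isIn tok t = true
  · rw [if_pos hin, if_pos hin, PySem.Str.toList_strip]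
    congr 1
    have hsplit : PySem.Str.split? t tok
        = some ((PySem.Chars.splitOn t.toList tok.toList).map String.ofList) := by
      unfold PySem.Str.split? PySem.Chars.split?
      rw [if_neg (by simpa using htok')]
      rfl
    rw [hsplit, Option.getD_some]
    exact pv_getD_map _
  · rw [if_neg hin, if_neg hin]

-- ---- the Str-level main equration, for the stripped text ----
lemma pv_top (T : String)
    (hsl : PySem.Chars.lstrip T.toList = T.toList)
    (hsr : PySem.Chars.rstrip T.toList = T.toList) :
    ([" - ", " OEM", " Retail", "("].foldl
        (fun t tok =>
          if PySem.Str.isIn tok t then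
            PySem.Str.strip (((PySem.Str.split? t tok).getD []).getD 0 "")
          else t) T)
      = (match PySem.List.min?
            (([" - ", " OEM", " Retail", "("].map
               (fun tk => PySem.Str.find T tk)).filter (fun i => i != -1)) (fun x => x) with
          | none => T
          | some m => PySem.Str.strip (PySem.Str.slice T none (some m))) := by
  have ht1 : (" - " : String).toList = [' ', '-', ' '] := by decide
  have ht2 : (" OEM" : String).toList = [' ', 'O', 'E', 'M'] := by decide
  have ht3 : (" Retail" : String).toList = [' ', 'R', 'e', 't', 'a', 'i', 'l'] := by decide
  have ht4 : ("(" : String).toList = ['('] := by decide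
  apply String.toList_inj.mp
  have hfold : (([" - ", " OEM", " Retail", "("].foldl
        (fun t tok =>
          if PySem.Str.isIn tok t then
            PySem.Str.strip (((PySem.Str.split? t tok).getD []).getD 0 "")
          else t) T)).toList
      = [[' ', '-', ' '], [' ', 'O', 'E', 'M'], [' ', 'R', 'e', 't', 'a', 'i', 'l'], ['(']].foldl
          pvCutA T.toList := by
    simp only [List.foldl]
    rw [pv_strStep _ "(" (by decide), pv_strStep _ " Retail" (by decide),
      pv_strStep _ " OEM" (by decide), pv_strStep _ " - " (by decide),
      ht1, ht2, ht3, ht4]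
  rw [hfold, pv_main T.toList hsl hsr]
  have hidx : ([" - ", " OEM", " Retail", "("].map (fun tk => PySem.Str.find T tk))
      = ([[' ', '-', ' '], [' ', 'O', 'E', 'M'], [' ', 'R', 'e', 't', 'a', 'i', 'l'], ['(']].map
          (fun t => PySem.Chars.find T.toList t)) := by
    simp only [List.map, PySem.Str.find_eq, ht1, ht2, ht3, ht4]
  rw [← hidx]
  cases hm : PySem.List.min?
      (([" - ", " OEM", " Retail", "("].map
        (fun tk => PySem.Str.find T tk)).filter (fun i => i != -1)) (fun x => x) with
  | none => rfl
  | some m =>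
    show PySem.Chars.strip (PySem.List.slice T.toList none (some m))
        = (PySem.Str.strip (PySem.Str.slice T none (some m))).toList
    rw [PySem.Str.toList_strip, PySem.Str.toList_slice, PySem.Chars.slice_eq_listSlice]

-- ===== VERDICT (by name: the statement is the Claim_ definition above) =====
theorem detect_os_version_spec : Claim_equal_detect_os_version := by
  intro name _
  unfold Spec_detect_os_version
  cases name with
  | none => rfl
  | some n =>
    show detect_os_version (some n) = detect_os_version_alt (some n)
    by_cases hn : n = ""
    · simp [detect_os_version, detect_os_version_alt, hn]
    · simp only [detect_os_version, detect_os_version_alt, if_neg hn]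
      have hsl : PySem.Chars.lstrip
          (PySem.Str.strip (PySem.Str.replace n "Microsoft" "")).toList
          = (PySem.Str.strip (PySem.Str.replace n "Microsoft" "")).toList := by
        rw [PySem.Str.toList_strip]
        exact pv_lstrip_strip _
      have hsr : PySem.Chars.rstrip
          (PySem.Str.strip (PySem.Str.replace n "Microsoft" "")).toList
          = (PySem.Str.strip (PySem.Str.replace n "Microsoft" "")).toList := by
        rw [PySem.Str.toList_strip]
        exact pv_rstrip_strip _
      rw [pv_top _ hsl hsr]
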